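-- pv_equiv track=rewrite | github.com/anwitjagtap/Automated-API-Testing-Tool | payloadValidations.py | make_valid_dict_keys
-- ===== SOURCE A (Python) =====
-- def make_valid_dict_keys(rearrange:dict)-> dict:
--     new_dict = {}
--     for key, value in rearrange.items():
--         modified_key = key
--         count = key.count("{}")
--         while count:
--             start = modified_key.find("{}")
--             index = start + 2
--             while index < len(modified_key) and (modified_key[index] != "[" and modified_key[index] != "{"):
--                 index += 1
--             modified_key = modified_key[:start] + "['" + modified_key[start+2:index] + "']" + modified_key[index:]
--             count -= 1
--         modified_key = modified_key.replace("['']", "")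
--         new_dict[modified_key] = value
--     return new_dict
-- ===== SOURCE B (Python) =====
-- def make_valid_dict_keys(rearrange: dict) -> dict:
--     # Single left-to-right pass per key: consume each "{}" marker together with the
--     # segment up to the next '[' or '{' and emit "['segment']"; other chars are copied.
--     new_dict = {}
--     for key, value in rearrange.items():
--         parts = []
--         i = 0
--         n = len(key)
--         while i < n:
--             if key.startswith("{}", i):
--                 j = i + 2
--                 while j < n and key[j] != "[" and key[j] != "{":
--                     j += 1
--                 parts.append("['" + key[i + 2:j] + "']")
--                 i = j
--             else:
--                 parts.append(key[i])
--                 i += 1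
--         new_dict["".join(parts).replace("['']", "")] = value
--     return new_dict
-- ===== Notes on version B (the rewrite author's own statement) =====
-- stated objective: alternative
-- what changed: Replaced A's repeated find-and-splice loop (a full find plus three slices of the whole key per marker, rebuilding the key each time) by a single left-to-right pass per key that consumes each '{}' marker and its segment directly while copying other characters.
import Mathlib
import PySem

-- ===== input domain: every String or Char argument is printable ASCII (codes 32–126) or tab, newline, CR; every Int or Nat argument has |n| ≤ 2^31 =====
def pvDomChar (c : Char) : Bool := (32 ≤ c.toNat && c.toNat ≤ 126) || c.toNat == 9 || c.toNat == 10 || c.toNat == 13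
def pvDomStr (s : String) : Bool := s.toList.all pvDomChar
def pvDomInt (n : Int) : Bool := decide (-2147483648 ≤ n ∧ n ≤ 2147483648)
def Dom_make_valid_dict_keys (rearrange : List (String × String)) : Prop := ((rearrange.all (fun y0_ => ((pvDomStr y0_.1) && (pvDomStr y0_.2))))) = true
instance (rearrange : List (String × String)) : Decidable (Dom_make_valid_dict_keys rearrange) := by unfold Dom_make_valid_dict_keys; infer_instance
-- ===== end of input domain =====

-- B rewrites each key in ONE left-to-right pass instead of A's per-marker find-and-splice loop; return values proved equal on all inputs.

-- ===== PORT A =====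
-- the substring "{}" searched for, and the substring "['']" removed at the end
def pvMarker : List Char := ['{', '}']
def pvQuoted : List Char := ['[', '\'', '\'', ']']

-- inner while: 'while index < len(s) and (s[index] != "[" and s[index] != "{"): index += 1'
-- (Python's 'index' starts at start+2 ≥ 1 whenever this runs, so a Nat index is exact)
def pvAScan (s : List Char) (i : Nat) : Nat :=
  if h : i < s.length then
    if s[i] ≠ '[' ∧ s[i] ≠ '{' then pvAScan s (i + 1) else i
  else i
termination_by s.length - i

-- one iteration of the 'while count:' body (find, scan, three slices)
def pvAStep (s : List Char) : List Char :=
  let start := PySem.Chars.find s pvMarker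
  let index := pvAScan s (start + 2).toNat
  PySem.List.slice s none (some start) ++ ['[', '\''] ++
    PySem.List.slice s (some (start + 2)) (some (index : Int)) ++ ['\'', ']'] ++
    PySem.List.slice s (some (index : Int)) none

-- 'while count: … count -= 1'
def pvALoop : Nat → List Char → List Char
  | 0, s => s
  | n + 1, s => pvALoop n (pvAStep s)

def pvATransform (key : List Char) : List Char :=
  PySem.Chars.replace (pvALoop (PySem.Chars.count key pvMarker) key) pvQuoted []

def make_valid_dict_keys (rearrange : List (String × String)) : List (String × String) :=
  (rearrange.foldl
    (fun d kv => d.insert (String.ofList (pvATransform kv.1.toList)) kv.2)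
    (PySem.Dict.empty : PySem.Dict String String)).items

-- ===== PORT B =====
-- 'key[j] != "[" and key[j] != "{"'
def pvKeep (c : Char) : Bool := !(c == '[') && !(c == '{')

-- Source B's single while loop over the key: consume a '{}' marker plus its segment, or copy one char
def pvBScan : List Char → List Char
  | [] => []
  | c :: t =>
    if c = '{' ∧ t.head? = some '}' then
      ['[', '\''] ++ t.tail.takeWhile pvKeep ++ ['\'', ']'] ++ pvBScan (t.tail.dropWhile pvKeep)
    else c :: pvBScan t
termination_by s => s.length
decreasing_by
  · have h1 := List.length_dropWhile_le (l := t.tail) (p := pvKeep)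
    have h2 : t.tail.length ≤ t.length := by cases t <;> simp
    simp only [List.length_cons]; omega
  · simp only [List.length_cons]; omega

def pvBTransform (key : List Char) : List Char :=
  PySem.Chars.replace (pvBScan key) pvQuoted []

def make_valid_dict_keys_alt (rearrange : List (String × String)) : List (String × String) :=
  (rearrange.foldl
    (fun d kv => d.insert (String.ofList (pvBTransform kv.1.toList)) kv.2)
    (PySem.Dict.empty : PySem.Dict String String)).items

-- ===== PRECONDITION & SPEC =====
def Spec_make_valid_dict_keys (rearrange : List (String × String)) (out : List (String × String)) : Prop := out = make_valid_dict_keys_alt rearrange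
instance (rearrange : List (String × String)) (out : List (String × String)) : Decidable (Spec_make_valid_dict_keys rearrange out) := by unfold Spec_make_valid_dict_keys; infer_instance

-- ===== CLAIM (what is proved, stated in full; the proofs are below) =====
def Claim_equal_make_valid_dict_keys : Prop := ∀ (rearrange : List (String × String)), Dom_make_valid_dict_keys rearrange → Spec_make_valid_dict_keys rearrange (make_valid_dict_keys rearrange)

-- ===== LEMMAS AND PROOFS =====

-- characterisation of '"{}" starts at this position'
theorem pv_marker_prefix_iff (l : List Char) : pvMarker <+: l ↔ l[0]? = some '{' ∧ l[1]? = some '}' := by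
  unfold pvMarker
  constructor
  · rintro ⟨t, rfl⟩; simp
  · match l with
    | [] => simp
    | [a] => simp
    | a :: b :: t =>
      rintro ⟨h1, h2⟩
      simp at h1 h2
      subst h1; subst h2
      exact ⟨t, rfl⟩

theorem pv_marker_prefix_ex {l : List Char} (h : pvMarker <+: l) : ∃ t, l = '{' :: '}' :: t := by
  obtain ⟨w, hw⟩ := h
  exact ⟨w, by rw [← hw]; rfl⟩

-- count: accumulator and fuel bookkeeping for PySem.Chars.count.go
theorem pv_count_go_acc (fuel : Nat) (l : List Char) (acc : Nat) :
    PySem.Chars.count.go pvMarker fuel l acc = acc + PySem.Chars.count.go pvMarker fuel l 0 := by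
  induction fuel using Nat.strong_induction_on generalizing l acc with
  | _ fuel ih =>
    match fuel, l with
    | 0, l => simp [PySem.Chars.count.go]
    | fuel+1, [] => simp [PySem.Chars.count.go]
    | fuel+1, c :: t =>
      rw [PySem.Chars.count.go, PySem.Chars.count.go]
      split
      · rw [ih fuel (by omega), ih fuel (by omega) _ 1]; omega
      · exact ih fuel (by omega) _ _

theorem pv_marker_shape (l : List Char) (hp : pvMarker.isPrefixOf l) : ∃ t, l = '{' :: '}' :: t := by
  obtain ⟨t, rfl⟩ := List.isPrefixOf_iff_prefix.mp hp
  exact ⟨t, rfl⟩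

theorem pv_count_go_fuel (fuel : Nat) (l : List Char) (h : l.length ≤ fuel) :
    PySem.Chars.count.go pvMarker fuel l 0 = PySem.Chars.count.go pvMarker l.length l 0 := by
  induction fuel using Nat.strong_induction_on generalizing l with
  | _ fuel ih =>
    match fuel, l with
    | 0, l =>
      have : l = [] := by cases l <;> simp_all
      subst this; rfl
    | fuel+1, [] => simp [PySem.Chars.count.go]
    | fuel+1, c :: t =>
      simp only [List.length_cons]
      rw [PySem.Chars.count.go, PySem.Chars.count.go]
      by_cases hp : pvMarker.isPrefixOf (c :: t)
      · simp only [hp, if_true]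
        obtain ⟨t', ht'⟩ := pv_marker_shape _ hp
        cases ht'
        simp only [List.length_cons] at h
        have hd : List.drop pvMarker.length ('{' :: '}' :: t') = t' := rfl
        rw [hd, pv_count_go_acc]
        conv_rhs => rw [List.length_cons, pv_count_go_acc]
        rw [ih fuel (by omega) t' (by omega), ih (t'.length + 1) (by omega) t' (by omega)]
      · simp only [hp]
        simp only [List.length_cons] at h
        exact ih fuel (by omega) t (by omega)

theorem pv_count_eq_go (l : List Char) :
    PySem.Chars.count l pvMarker = PySem.Chars.count.go pvMarker l.length l 0 := by
  rw [PySem.Chars.count]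
  simp [pvMarker]

theorem pv_count_nil : PySem.Chars.count ([] : List Char) pvMarker = 0 := by
  rw [pv_count_eq_go]; rfl

theorem pv_count_cons (c : Char) (t : List Char) (h : ¬ pvMarker <+: (c :: t)) :
    PySem.Chars.count (c :: t) pvMarker = PySem.Chars.count t pvMarker := by
  rw [pv_count_eq_go, pv_count_eq_go]
  simp only [List.length_cons]
  rw [PySem.Chars.count.go]
  have hp : pvMarker.isPrefixOf (c :: t) = false := by
    by_contra hc
    exact h (List.isPrefixOf_iff_prefix.mp (by simpa using hc))
  simp [hp]

theorem pv_count_marker (t : List Char) :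
    PySem.Chars.count ('{' :: '}' :: t) pvMarker = PySem.Chars.count t pvMarker + 1 := by
  rw [pv_count_eq_go, pv_count_eq_go]
  simp only [List.length_cons]
  rw [PySem.Chars.count.go]
  have hp : pvMarker.isPrefixOf ('{' :: '}' :: t) = true :=
    List.isPrefixOf_iff_prefix.mpr ⟨t, rfl⟩
  simp only [hp, if_true]
  have hd : List.drop pvMarker.length ('{' :: '}' :: t) = t := rfl
  rw [hd, pv_count_go_acc, pv_count_go_fuel (t.length + 1) t (by omega)]
  omega

-- dropping a marker-free prefix does not change the count
theorem pv_count_drop (k : Nat) (s : List Char) (hk : k ≤ s.length)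
    (h : ∀ i < k, ¬ pvMarker <+: s.drop i) :
    PySem.Chars.count s pvMarker = PySem.Chars.count (s.drop k) pvMarker := by
  induction k generalizing s with
  | zero => simp
  | succ k ih =>
    match s with
    | [] => simp at hk
    | c :: t =>
      rw [pv_count_cons c t (by simpa using h 0 (by omega))]
      rw [ih t (by simpa using hk) (fun i hi => by simpa using h (i+1) (by omega))]
      simp

-- a prefix with no '{' admits no marker occurrence inside it
theorem pv_no_brace (p u : List Char) (hp : ∀ c ∈ p, c ≠ '{') :
    ∀ i < p.length, ¬ pvMarker <+: (p ++ u).drop i := by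
  intro i hi hpre
  rw [pv_marker_prefix_iff] at hpre
  have h0 : ((p ++ u).drop i)[0]? = some '{' := hpre.1
  rw [List.getElem?_drop, List.getElem?_append_left (by omega)] at h0
  have : p[i]? = some p[i] := List.getElem?_eq_getElem hi
  rw [Nat.add_zero] at h0
  have := hp p[i] (List.getElem_mem hi)
  simp_all

-- seam transfer: replacing the '{'-headed tail by a non-'}'-headed tail keeps the prefix marker-free
theorem pv_seam (q w u : List Char) (hu : u[0]? ≠ some '}')
    (h : ∀ i < q.length, ¬ pvMarker <+: (q ++ '{' :: w).drop i) :
    ∀ i < q.length, ¬ pvMarker <+: (q ++ u).drop i := by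
  intro i hi hpre
  rw [pv_marker_prefix_iff] at hpre
  obtain ⟨h0, h1⟩ := hpre
  rw [List.getElem?_drop, List.getElem?_append_left (by omega), Nat.add_zero] at h0
  rw [List.getElem?_drop] at h1
  by_cases hlt : i + 1 < q.length
  · rw [List.getElem?_append_left hlt] at h1
    refine h i hi ?_
    rw [pv_marker_prefix_iff]
    constructor
    · rw [List.getElem?_drop, List.getElem?_append_left (by omega), Nat.add_zero]; exact h0
    · rw [List.getElem?_drop, List.getElem?_append_left hlt]; exact h1
  · have hiq : i + 1 = q.length := by omega
    rw [List.getElem?_append_right (by omega)] at h1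
    rw [hiq, Nat.sub_self] at h1
    exact hu h1

theorem pv_count_zero_of_not_infix (s : List Char) (h : ¬ pvMarker <:+: s) :
    PySem.Chars.count s pvMarker = 0 := by
  induction s with
  | nil => exact pv_count_nil
  | cons c t ih =>
    rw [pv_count_cons c t (fun hp => h hp.isInfix)]
    exact ih (fun hi => h (hi.trans (List.suffix_cons c t).isInfix))

-- a run of non-'{' chars in front does not change the marker count
theorem pv_count_no_brace (p u : List Char) (hp : ∀ c ∈ p, c ≠ '{') :
    PySem.Chars.count (p ++ u) pvMarker = PySem.Chars.count u pvMarker := by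
  have := pv_count_drop p.length (p ++ u) (by simp) (pv_no_brace p u hp)
  rwa [List.drop_left] at this

theorem pv_keep_ne_brace {c : Char} (h : pvKeep c = true) : c ≠ '{' := by
  simp [pvKeep] at h; exact h.2

theorem pv_take_takeWhile (l : List Char) (p : Char → Bool) :
    l.take (l.takeWhile p).length = l.takeWhile p := by
  induction l with
  | nil => rfl
  | cons c t ih => by_cases h : p c <;> simp [h, ih]

theorem pv_drop_takeWhile (l : List Char) (p : Char → Bool) :
    l.drop (l.takeWhile p).length = l.dropWhile p := by
  induction l with
  | nil => rfl
  | cons c t ih => by_cases h : p c <;> simp [h, ih]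

-- the inner scan stops exactly at the end of the pvKeep-segment
theorem pv_scan_spec (s : List Char) (i : Nat) :
    pvAScan s i = i + ((s.drop i).takeWhile pvKeep).length := by
  fun_induction pvAScan s i with
  | case1 i h hc ih =>
    rw [ih, List.drop_eq_getElem_cons h, List.takeWhile_cons]
    have : pvKeep s[i] = true := by simp [pvKeep]; tauto
    simp [this]; omega
  | case2 i h hc =>
    rw [List.drop_eq_getElem_cons h, List.takeWhile_cons]
    have : pvKeep s[i] = false := by
      simp [pvKeep]
      rcases not_and_or.mp hc with h1 | h1 <;> simp at h1 <;> simp [h1]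
    simp [this]
  | case3 i h =>
    have : s.drop i = [] := List.drop_eq_nil_of_le (by omega)
    simp [this]

-- find points at the first occurrence
theorem pv_find_unique (s sub : List Char) (k : Nat) (hk : sub <+: s.drop k)
    (hmin : ∀ i < k, ¬ sub <+: s.drop i) : PySem.Chars.find s sub = k := by
  have hinf : sub <:+: s := by
    obtain ⟨t, ht⟩ := hk
    exact ⟨s.take k, t, by rw [List.append_assoc, ht]; exact List.take_append_drop k s⟩
  have h0 : 0 ≤ PySem.Chars.find s sub := (PySem.Chars.find_nonneg_iff s sub).mpr hinf
  obtain ⟨h1, h2⟩ := PySem.Chars.find_spec h0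
  set f := (PySem.Chars.find s sub).toNat with hf
  have : f = k := by
    rcases Nat.lt_trichotomy f k with h | h | h
    · exact absurd h1 (hmin f h)
    · exact h
    · exact absurd hk (h2 k h)
  omega

-- one A-iteration on a string whose first marker is at position q.length
theorem pv_step_eq (q t : List Char)
    (h : ∀ i < q.length, ¬ pvMarker <+: (q ++ '{' :: '}' :: t).drop i) :
    pvAStep (q ++ '{' :: '}' :: t) =
      q ++ ['[', '\''] ++ t.takeWhile pvKeep ++ ['\'', ']'] ++ t.dropWhile pvKeep := by
  set s := q ++ '{' :: '}' :: t with hs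
  have hdropq : s.drop q.length = '{' :: '}' :: t := by
    rw [hs, List.drop_left]
  have hdropq2 : s.drop (q.length + 2) = t := by
    have heq : s = (q ++ ['{', '}']) ++ t := by simp [hs]
    have hl : (q ++ ['{', '}']).length = q.length + 2 := by simp
    rw [heq, ← hl, List.drop_left]
  have hfind : PySem.Chars.find s pvMarker = (q.length : Int) :=
    pv_find_unique s pvMarker q.length (by rw [hdropq]; exact ⟨t, rfl⟩) h
  unfold pvAStep
  dsimp only
  rw [hfind]
  have hcast : ((q.length : Int) + 2).toNat = q.length + 2 := by omega
  rw [hcast, pv_scan_spec, hdropq2]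
  set m := (t.takeWhile pvKeep).length with hm
  have c1 : PySem.List.slice s none (some (q.length : Int)) = q := by
    rw [PySem.List.slice_to_natCast, hs, List.take_left]
  have c2 : PySem.List.slice s (some ((q.length : Int) + 2)) (some ((q.length + 2 + m : Nat) : Int)) = t.takeWhile pvKeep := by
    have : ((q.length : Int) + 2) = ((q.length + 2 : Nat) : Int) := by push_cast; ring
    rw [this, PySem.List.slice_natCast, hdropq2,
        show q.length + 2 + m - (q.length + 2) = m by omega, hm, pv_take_takeWhile]
  have c3 : PySem.List.slice s (some ((q.length + 2 + m : Nat) : Int)) none = t.dropWhile pvKeep := by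
    rw [PySem.List.slice_from_natCast,
        show q.length + 2 + m = (q.length + 2) + m by omega, ← List.drop_drop, hdropq2, hm,
        pv_drop_takeWhile]
  rw [c1, c2, c3]

-- B's equations
theorem pvBScan_marker (t : List Char) :
    pvBScan ('{' :: '}' :: t) =
      ['[', '\''] ++ t.takeWhile pvKeep ++ ['\'', ']'] ++ pvBScan (t.dropWhile pvKeep) := by
  rw [pvBScan]
  simp

theorem pvBScan_cons (c : Char) (t : List Char) (h : ¬ pvMarker <+: (c :: t)) :
    pvBScan (c :: t) = c :: pvBScan t := by
  rw [pvBScan]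
  have : ¬ (c = '{' ∧ t.head? = some '}') := by
    intro ⟨h1, h2⟩
    refine h ?_
    rw [pv_marker_prefix_iff]
    constructor
    · simp [h1]
    · simp only [List.getElem?_cons_succ]; rw [← List.head?_eq_getElem?]; exact h2
  simp [this]

-- B copies a marker-free prefix unchanged
theorem pv_bscan_append (q u : List Char)
    (h : ∀ i < q.length, ¬ pvMarker <+: (q ++ u).drop i) :
    pvBScan (q ++ u) = q ++ pvBScan u := by
  induction q with
  | nil => simp
  | cons c q' ih =>
    rw [List.cons_append, pvBScan_cons c (q' ++ u) (by simpa using h 0 (by simp))]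
    rw [ih (fun i hi => by simpa using h (i+1) (by simp; omega))]
    simp

theorem pv_bscan_id (s : List Char) (h : PySem.Chars.count s pvMarker = 0) :
    pvBScan s = s := by
  induction s with
  | nil => rw [pvBScan]
  | cons c t ih =>
    have hnp : ¬ pvMarker <+: (c :: t) := by
      intro hp
      rw [pv_marker_prefix_iff] at hp
      match c, t, hp with
      | _, b :: t', ⟨h1, h2⟩ =>
        simp at h1 h2; subst h1; subst h2
        rw [pv_count_marker] at h; omega
    rw [pvBScan_cons c t hnp, ih (by rw [pv_count_cons c t hnp] at h; exact h)]

-- main: the whole A-loop equals the single B-pass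
theorem pv_loop_eq_scan (s : List Char) :
    pvALoop (PySem.Chars.count s pvMarker) s = pvBScan s := by
  generalize hn : PySem.Chars.count s pvMarker = n
  induction n using Nat.strong_induction_on generalizing s with
  | _ n ih =>
    match n with
    | 0 => exact (pv_bscan_id s hn).symm
    | n + 1 =>
      have hinf : pvMarker <:+: s := by
        by_contra hc
        rw [pv_count_zero_of_not_infix s hc] at hn; omega
      have h0 : 0 ≤ PySem.Chars.find s pvMarker := (PySem.Chars.find_nonneg_iff s pvMarker).mpr hinf
      obtain ⟨h1, h2⟩ := PySem.Chars.find_spec h0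
      set k := (PySem.Chars.find s pvMarker).toNat with hkdef
      obtain ⟨t, ht⟩ := pv_marker_prefix_ex h1
      have hklen : k ≤ s.length := by
        by_contra hc
        rw [List.drop_eq_nil_of_le (by omega)] at ht; simp at ht
      have hq : s = s.take k ++ '{' :: '}' :: t := by rw [← ht, List.take_append_drop]
      set q := s.take k with hqdef
      have hqlen : q.length = k := by rw [hqdef, List.length_take_of_le hklen]
      have hmin : ∀ i < q.length, ¬ pvMarker <+: (q ++ '{' :: '}' :: t).drop i := by
        rw [← hq, hqlen]; exact h2
      set seg := t.takeWhile pvKeep with hseg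
      set rest := t.dropWhile pvKeep with hrest
      set v : List Char := '[' :: '\'' :: (seg ++ ['\'', ']']) with hv
      have hvform : q ++ ['[', '\''] ++ seg ++ ['\'', ']'] ++ rest = q ++ (v ++ rest) := by
        simp [hv, List.append_assoc]
      have hnobrace_v : ∀ c ∈ v, c ≠ '{' := by
        intro c hc
        rw [hv] at hc
        simp at hc
        rcases hc with h | h | h | h | h
        · subst h; decide
        · subst h; decide
        · exact pv_keep_ne_brace (List.mem_takeWhile_imp (hseg ▸ h))
        · subst h; decide
        · subst h; decide
      have hcount_t : PySem.Chars.count t pvMarker = n := by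
        have e1 : PySem.Chars.count s pvMarker = PySem.Chars.count ('{' :: '}' :: t) pvMarker := by
          rw [← ht]; exact pv_count_drop k s hklen h2
        rw [pv_count_marker] at e1; omega
      have htsplit : t = seg ++ rest := (List.takeWhile_append_dropWhile (p := pvKeep) (l := t)).symm
      have hnobrace_seg : ∀ c ∈ seg, c ≠ '{' := fun c hc => pv_keep_ne_brace (List.mem_takeWhile_imp (hseg ▸ hc))
      have hcount_rest : PySem.Chars.count rest pvMarker = n := by
        rw [htsplit, pv_count_no_brace seg rest hnobrace_seg] at hcount_t; exact hcount_t
      have hseam : ∀ i < q.length, ¬ pvMarker <+: (q ++ (v ++ rest)).drop i := by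
        refine pv_seam q ('}' :: t) (v ++ rest) (by rw [hv]; simp) hmin
      have hcount_new : PySem.Chars.count (q ++ (v ++ rest)) pvMarker = n := by
        have e2 := pv_count_drop q.length (q ++ (v ++ rest)) (by simp) hseam
        rw [List.drop_left] at e2
        rw [e2, pv_count_no_brace v rest hnobrace_v, hcount_rest]
      have hstep : pvAStep s = q ++ (v ++ rest) := by
        conv_lhs => rw [hq]
        rw [pv_step_eq q t hmin, ← hseg, ← hrest, hvform]
      have hA : pvALoop (n + 1) s = pvALoop n (q ++ (v ++ rest)) := by
        show pvALoop n (pvAStep s) = _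
        rw [hstep]
      rw [hA, ih n (by omega) (q ++ (v ++ rest)) hcount_new]
      rw [pv_bscan_append q (v ++ rest) hseam,
          pv_bscan_append v rest (pv_no_brace v rest hnobrace_v)]
      conv_rhs => rw [hq, pv_bscan_append q ('{' :: '}' :: t) hmin, pvBScan_marker, ← hseg, ← hrest]
      rw [hv]
      simp [List.append_assoc]

theorem pv_transform_eq (key : List Char) : pvATransform key = pvBTransform key := by
  unfold pvATransform pvBTransform
  rw [pv_loop_eq_scan]

-- ===== VERDICT (by name: the statement is the Claim_ definition above) =====
theorem make_valid_dict_keys_spec : Claim_equal_make_valid_dict_keys := by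
  intro rearrange _hdom
  unfold Spec_make_valid_dict_keys make_valid_dict_keys make_valid_dict_keys_alt
  simp only [pv_transform_eq]
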